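-- pv_equiv track=rewrite | github.com/BULQI/IgSeq | DataPreprocessing_code/UMI_DeDup/merge_umi3_feng.py | get_aligned_range
-- ===== SOURCE A (Python) =====
-- def get_aligned_range(seq):
--         start1 = 0
--         for i in range(len(seq)):
--                 if seq[i] != '-':
--                         start1 = i
--                         break
--         stop1 = len(seq)
--         for i in reversed(range(len(seq))):
--                 if seq[i] != '-':
--                         stop1 = i + 1
--                         break
--         return (start1, stop1)
-- ===== SOURCE B (Python) =====
-- def get_aligned_range(seq):
--     first = None
--     last = None
--     for i, ch in enumerate(seq):
--         if ch != '-':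
--             if first is None:
--                 first = i
--             last = i
--     return (first if first is not None else 0,
--             last + 1 if last is not None else len(seq))
-- ===== Notes on version B (the rewrite author's own statement) =====
-- stated objective: alternative
-- what changed: Replaces A's two directional early-exit scans (a forward scan for the start and a reversed scan for the stop) by a single left-to-right pass with enumerate that tracks both the first and the last non-dash index in one accumulator.
import Mathlib
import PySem

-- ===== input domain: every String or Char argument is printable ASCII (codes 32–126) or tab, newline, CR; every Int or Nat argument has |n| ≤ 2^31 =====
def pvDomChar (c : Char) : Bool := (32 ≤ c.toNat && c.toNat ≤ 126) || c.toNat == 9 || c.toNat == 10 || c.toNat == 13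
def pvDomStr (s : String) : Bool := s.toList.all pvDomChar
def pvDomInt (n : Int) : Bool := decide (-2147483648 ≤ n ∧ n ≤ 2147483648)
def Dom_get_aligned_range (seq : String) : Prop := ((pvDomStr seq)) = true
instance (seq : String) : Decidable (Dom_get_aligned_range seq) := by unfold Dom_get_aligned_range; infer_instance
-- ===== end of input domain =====

-- B replaces A's two directional early-exit scans by a single enumerate pass tracking both ends (objective: alternative decomposition).

-- ===== PORT A =====
-- A's forward loop with break: first index i (counting from the accumulator) whose char is not '-'.
def pvScanA : List Char → Int → Option Int
  | [], _ => none
  | c :: rest, i => if c ≠ '-' then some i else pvScanA rest (i + 1)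

def get_aligned_range (seq : String) : Int × Int :=
  let cs := seq.toList
  let n : Int := cs.length
  -- start1 = 0; for i in range(len(seq)): if seq[i] != '-': start1 = i; break
  let start1 : Int := match pvScanA cs 0 with
    | some i => i
    | none => 0
  -- stop1 = len(seq); for i in reversed(range(len(seq))): if seq[i] != '-': stop1 = i + 1; break
  -- iterating i over reversed(range(n)) = scanning the reversed list; position j there is index n-1-j, stop = (n-1-j)+1 = n-j
  let stop1 : Int := match pvScanA cs.reverse 0 with
    | some j => n - j
    | none => n
  (start1, stop1)

-- ===== PORT B =====
def pvStepB (st : Option Int × Option Int) (p : Int × Char) : Option Int × Option Int :=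
  if p.2 ≠ '-' then ((if st.1.isNone then some p.1 else st.1), some p.1) else st

def get_aligned_range_alt (seq : String) : Int × Int :=
  let cs := seq.toList
  let st := (PySem.List.enumerate cs).foldl pvStepB (none, none)
  (match st.1 with | some i => i | none => 0,
   match st.2 with | some j => j + 1 | none => (cs.length : Int))

-- ===== PRECONDITION & SPEC =====
def Spec_get_aligned_range (seq : String) (out : Int × Int) : Prop := out = get_aligned_range_alt seq
instance (seq : String) (out : Int × Int) : Decidable (Spec_get_aligned_range seq out) := by unfold Spec_get_aligned_range; infer_instance

-- ===== CLAIM (what is proved, stated in full; the proofs are below) =====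
def Claim_equal_get_aligned_range : Prop := ∀ (seq : String), Dom_get_aligned_range seq → Spec_get_aligned_range seq (get_aligned_range seq)

-- ===== LEMMAS AND PROOFS =====

-- last non-dash index of a list, relative to its head
def pvLastRel : List Char → Option Int
  | [] => none
  | c :: rest => match pvLastRel rest with
    | some j => some (j + 1)
    | none => if c ≠ '-' then some 0 else none

theorem pvScanA_append (xs ys : List Char) (i : Int) :
    pvScanA (xs ++ ys) i =
      (match pvScanA xs i with
        | some a => some a
        | none => pvScanA ys (i + xs.length)) := by
  induction xs generalizing i with
  | nil => simp [pvScanA]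
  | cons c rest ih =>
    by_cases h : c = '-'
    · simp only [List.cons_append, pvScanA, h, ne_eq, not_true_eq_false, if_false, ih,
        List.length_cons]
      have harith : i + 1 + (rest.length : Int) = i + ((rest.length + 1 : Nat) : Int) := by
        push_cast; ring
      rw [harith]
    · simp [pvScanA, h]

theorem pvScanA_reverse (cs : List Char) :
    pvScanA cs.reverse 0 = (pvLastRel cs).map (fun j => (cs.length : Int) - 1 - j) := by
  induction cs with
  | nil => simp [pvScanA, pvLastRel]
  | cons c rest ih =>
    rw [List.reverse_cons, pvScanA_append, ih]
    cases hl : pvLastRel rest with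
    | some j =>
      simp [pvLastRel, hl]
      ring
    | none =>
      by_cases h : c = '-' <;>
        simp [pvLastRel, hl, pvScanA, h]

theorem pvFold_fst (cs : List Char) (k : Int) (st : Option Int × Option Int) :
    ((PySem.List.enumerate cs k).foldl pvStepB st).1 =
      (match st.1 with
        | some a => some a
        | none => pvScanA cs k) := by
  induction cs generalizing k st with
  | nil => cases hst : st.1 <;> simp [PySem.List.enumerate_nil, pvScanA, hst]
  | cons c rest ih =>
    rw [PySem.List.enumerate_cons, List.foldl_cons, ih]
    by_cases h : c = '-'
    · cases hf : st.1 <;> simp [pvStepB, h, pvScanA, hf]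
    · cases hf : st.1 <;> simp [pvStepB, h, pvScanA, hf]

theorem pvFold_snd (cs : List Char) (k : Int) (st : Option Int × Option Int) :
    ((PySem.List.enumerate cs k).foldl pvStepB st).2 =
      (match pvLastRel cs with
        | some j => some (k + j)
        | none => st.2) := by
  induction cs generalizing k st with
  | nil => simp [PySem.List.enumerate_nil, pvLastRel]
  | cons c rest ih =>
    rw [PySem.List.enumerate_cons, List.foldl_cons, ih]
    cases hl : pvLastRel rest with
    | some j =>
      simp [pvLastRel, hl]
      ring
    | none =>
      by_cases h : c = '-' <;> simp [pvLastRel, hl, pvStepB, h]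

-- ===== VERDICT (by name: the statement is the Claim_ definition above) =====
theorem get_aligned_range_spec : Claim_equal_get_aligned_range := by
  intro seq _
  unfold Spec_get_aligned_range get_aligned_range get_aligned_range_alt
  set cs := seq.toList with hcs
  refine Prod.ext ?_ ?_
  · simp only [pvFold_fst]
  · simp only [pvFold_snd, pvScanA_reverse]
    cases hl : pvLastRel cs with
    | some j => simp; ring
    | none => simp
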